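-- pv_equiv track=rewrite | github.com/mwridgway/chronos_x | chronos_x/validation/cpcv.py | generate_cpcv_paths
-- ===== SOURCE A (Python) =====
-- from itertools import combinations
--
-- def generate_cpcv_paths(
--     n_splits: int,
--     n_test_splits: int,
-- ) -> list[list[int]]:
--     """Generate all possible backtest paths through CPCV folds.
--
--     Each path represents a complete walk through all data,
--     with each fold appearing in exactly one test set.
--
--     Args:
--         n_splits: Number of CV splits
--         n_test_splits: Number of test groups per combination
--
--     Returns:
--         List of paths, where each path is a list of combination indices
--     """
--     # Generate all test combinations
--     all_combinations = list(combinations(range(n_splits), n_test_splits))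
--
--     # Find paths that cover all folds exactly once
--     def find_paths(
--         used_folds: set,
--         current_path: list,
--         remaining_combinations: list,
--     ) -> list[list[int]]:
--         if len(used_folds) == n_splits:
--             return [current_path]
--
--         paths = []
--         for i, combo in enumerate(remaining_combinations):
--             if not any(f in used_folds for f in combo):
--                 new_used = used_folds | set(combo)
--                 new_path = current_path + [all_combinations.index(combo)]
--                 new_remaining = remaining_combinations[i + 1 :]
--                 paths.extend(find_paths(new_used, new_path, new_remaining))
--
--         return paths
--
--     return find_paths(set(), [], all_combinations)
-- ===== SOURCE B (Python) =====
-- from itertools import combinations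
--
--
-- def generate_cpcv_paths(
--     n_splits: int,
--     n_test_splits: int,
-- ) -> list[list[int]]:
--     """Generate all CPCV backtest paths by anchored set partitioning.
--
--     Instead of scanning every remaining combination and filtering by
--     overlap, anchor each block on the smallest uncovered fold and choose
--     only its companions, so no dead-end branches are explored.
--     """
--     all_blocks = list(combinations(range(n_splits), n_test_splits))
--     index_of = {block: i for i, block in enumerate(all_blocks)}
--
--     def rec(unused: list) -> list[list[int]]:
--         if not unused:
--             return [[]]
--         m, rest = unused[0], unused[1:]
--         paths = []
--         for companions in combinations(rest, n_test_splits - 1):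
--             idx = index_of[(m,) + companions]
--             remaining = [f for f in rest if f not in companions]
--             for tail in rec(remaining):
--                 paths.append([idx] + tail)
--         return paths
--
--     if n_splits == 0:
--         return [[]]
--     if n_test_splits < 1:
--         return []
--     return rec(list(range(n_splits)))
-- ===== Notes on version B (the rewrite author's own statement) =====
-- stated objective: alternative
-- what changed: B builds each partition by anchoring every block on the smallest uncovered fold and enumerating only that fold's companions (block indices via a precomputed dict), instead of scanning all remaining combinations, filtering by overlap and re-finding each chosen block with list.index.
-- outside the precondition, e.g. on generate_cpcv_paths(-2, 1): A returns [], B returns [[]]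
import Mathlib
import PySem

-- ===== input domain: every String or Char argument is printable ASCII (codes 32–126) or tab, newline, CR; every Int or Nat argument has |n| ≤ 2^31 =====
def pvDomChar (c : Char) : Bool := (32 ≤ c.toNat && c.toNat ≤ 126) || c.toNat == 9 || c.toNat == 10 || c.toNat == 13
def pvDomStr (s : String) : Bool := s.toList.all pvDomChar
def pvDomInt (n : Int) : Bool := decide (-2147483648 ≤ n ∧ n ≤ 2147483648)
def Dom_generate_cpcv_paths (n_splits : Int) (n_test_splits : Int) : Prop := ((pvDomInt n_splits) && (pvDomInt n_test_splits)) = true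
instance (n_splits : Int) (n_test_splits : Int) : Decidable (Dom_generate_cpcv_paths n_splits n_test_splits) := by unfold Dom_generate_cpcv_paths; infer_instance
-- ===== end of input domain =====

-- B builds each CPCV path by anchoring every block on the smallest uncovered fold (block index
-- looked up in a precomputed dict) instead of scanning all remaining combinations, filtering by
-- overlap and re-finding each block with list.index (a different enumeration of the same paths).

-- ===== PORT A =====

/-- `list(itertools.combinations(l, r))` in the library's lexicographic order
    (exact recursion; both Pythons call this same library function). -/
def pyCombos : List Int → Nat → List (List Int)
  | _, 0 => [[]]
  | [], _ + 1 => []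
  | x :: xs, k + 1 =>
      -- itertools' short-circuit: combinations(pool, r) yields nothing when r > len(pool)
      -- (both recursive branches below would produce [] there anyway; see pyCombos_cons)
      if xs.length < k then []
      else (pyCombos xs k).map (fun c => x :: c) ++ pyCombos xs (k + 1)

/-- A's inner `find_paths(used_folds, current_path, remaining_combinations)`.
    The loop `for i, combo in enumerate(remaining)` with tail `remaining[i+1:]` is the structural
    recursion on `remaining`; re-checking the `len(used_folds) == n_splits` guard along the spine
    is a no-op because `used_folds` is unchanged there. `all_combinations.index(combo)` always
    succeeds (`combo` is drawn from that list), so the `.getD 0` default is never used. -/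
def fpA (n : Int) (all : List (List Int)) : List (List Int) → PySem.Set Int → List Int → List (List Int)
  | [], used, path => if PySem.List.len used = n then [path] else []
  | c :: rest, used, path =>
      if PySem.List.len used = n then [path]
      else
        (if c.any (fun f => PySem.Set.contains used f) then []
         else fpA n all rest (PySem.Set.union used (PySem.Set.ofList c))
                (path ++ [(((PySem.List.index? all c).getD 0 : Nat) : Int)]))
        ++ fpA n all rest used path

def generate_cpcv_paths (n_splits : Int) (n_test_splits : Int) : List (List Int) :=
  -- `n_test_splits.toNat` is faithful under Pre_ (0 ≤ n_test_splits; Python raises ValueError below 0)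
  let all := pyCombos (PySem.List.pyRange 0 n_splits 1) n_test_splits.toNat
  fpA n_splits all all PySem.Set.empty []

-- ===== PORT B =====

/-- `index_of = {block: i for i, block in enumerate(all_blocks)}`. -/
def buildIdx (all : List (List Int)) : PySem.Dict (List Int) Int :=
  (PySem.List.enumerate all).foldl (fun d p => PySem.Dict.insert d p.2 p.1) PySem.Dict.empty

/-- B's inner `rec(unused)`: anchor on the smallest uncovered fold `m`, enumerate only its
    companion sets; `index_of[(m,) + companions]` always succeeds, so `.getD 0` is never used. -/
def recB (k : Int) (idx : PySem.Dict (List Int) Int) : List Int → List (List Int)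
  | [] => [[]]
  | m :: rest =>
      (pyCombos rest (k.toNat - 1)).flatMap (fun comp =>
        (recB k idx (rest.filter (fun f => !comp.contains f))).map
          (fun tail => PySem.Dict.getD idx (m :: comp) 0 :: tail))
termination_by u => u.length
decreasing_by
  simp only [List.length_unattach, List.length_cons]
  exact Nat.lt_succ_of_le (le_trans (List.length_filter_le _ _) (by simp))

def generate_cpcv_paths_alt (n_splits : Int) (n_test_splits : Int) : List (List Int) :=
  let all := pyCombos (PySem.List.pyRange 0 n_splits 1) n_test_splits.toNat
  let idx := buildIdx all
  if n_splits = 0 then [[]]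
  else if n_test_splits < 1 then []
  else recB n_test_splits idx (PySem.List.pyRange 0 n_splits 1)

-- ===== PRECONDITION & SPEC =====

-- Pre_ keeps the function's natural domain: it excludes negative n_test_splits, on which A raises
-- ValueError inside itertools.combinations, and negative n_splits, a meaningless split count on
-- which A's [] merely falls out of comparing a set size with a negative number.
def Pre_generate_cpcv_paths (n_splits : Int) (n_test_splits : Int) : Prop :=
  0 ≤ n_splits ∧ 0 ≤ n_test_splits
instance (n_splits : Int) (n_test_splits : Int) : Decidable (Pre_generate_cpcv_paths n_splits n_test_splits) := by unfold Pre_generate_cpcv_paths; infer_instance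

def pvWitness_generate_cpcv_paths : Int × Int := (4, 2)

def Spec_generate_cpcv_paths (n_splits : Int) (n_test_splits : Int) (out : List (List Int)) : Prop := out = generate_cpcv_paths_alt n_splits n_test_splits
instance (n_splits : Int) (n_test_splits : Int) (out : List (List Int)) : Decidable (Spec_generate_cpcv_paths n_splits n_test_splits out) := by unfold Spec_generate_cpcv_paths; infer_instance

-- ===== CLAIM (what is proved, stated in full; the proofs are below) =====
def Claim_equal_generate_cpcv_paths : Prop := ∀ (n_splits : Int) (n_test_splits : Int), Dom_generate_cpcv_paths n_splits n_test_splits → Pre_generate_cpcv_paths n_splits n_test_splits → Spec_generate_cpcv_paths n_splits n_test_splits (generate_cpcv_paths n_splits n_test_splits)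

-- ===== LEMMAS AND PROOFS =====

lemma pyCombos_zero (l : List Int) : pyCombos l 0 = [[]] := by
  cases l <;> rfl

lemma pyCombos_short : ∀ (l : List Int) (k : Nat), l.length < k → pyCombos l k = [] := by
  intro l
  induction l with
  | nil => intro k hk; cases k with | zero => omega | succ k => rfl
  | cons x xs ih =>
    intro k hk
    cases k with
    | zero => omega
    | succ k =>
      have h : xs.length < k := by simp at hk; omega
      simp [pyCombos, h]

lemma pyCombos_cons (x : Int) (xs : List Int) (k : Nat) :
    pyCombos (x :: xs) (k + 1) = (pyCombos xs k).map (fun c => x :: c) ++ pyCombos xs (k + 1) := by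
  by_cases h : xs.length < k
  · rw [pyCombos_short xs k h, pyCombos_short xs (k+1) (by omega)]
    simp [pyCombos, h]
  · simp [pyCombos, h]

lemma combos_sublist : ∀ (l : List Int) (k : Nat) (b : List Int), b ∈ pyCombos l k → b.Sublist l := by
  intro l
  induction l with
  | nil => intro k b hb; cases k <;> simp [pyCombos] at hb <;> simp [hb]
  | cons x xs ih =>
    intro k b hb
    cases k with
    | zero => simp [pyCombos] at hb; simp [hb]
    | succ k =>
      rw [pyCombos_cons] at hb
      simp only [List.mem_append, List.mem_map] at hb
      rcases hb with ⟨c, hc, rfl⟩ | hb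
      · exact List.Sublist.cons₂ x (ih k c hc)
      · exact (ih (k+1) b hb).cons x

lemma combos_length : ∀ (l : List Int) (k : Nat) (b : List Int), b ∈ pyCombos l k → b.length = k := by
  intro l
  induction l with
  | nil => intro k b hb; cases k <;> simp [pyCombos] at hb <;> simp [hb]
  | cons x xs ih =>
    intro k b hb
    cases k with
    | zero => simp [pyCombos] at hb; simp [hb]
    | succ k =>
      rw [pyCombos_cons] at hb
      simp only [List.mem_append, List.mem_map] at hb
      rcases hb with ⟨c, hc, rfl⟩ | hb
      · simp [ih k c hc]
      · exact ih (k+1) b hb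

lemma mem_combos : ∀ (l : List Int) (k : Nat) (b : List Int), b.Sublist l → b.length = k → b ∈ pyCombos l k := by
  intro l
  induction l with
  | nil => intro k b hb hl; rw [List.sublist_nil] at hb; subst hb; simp at hl; subst hl; simp [pyCombos]
  | cons x xs ih =>
    intro k b hb hl
    cases k with
    | zero => rw [List.length_eq_zero_iff] at hl; subst hl; simp [pyCombos]
    | succ k =>
      rw [pyCombos_cons]
      simp only [List.mem_append, List.mem_map]
      cases hb with
      | cons _ h => exact Or.inr (ih (k+1) b h hl)
      | cons₂ _ h =>
        rename_i b'
        exact Or.inl ⟨b', ih k b' h (by simpa using hl), rfl⟩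

lemma combos_nodup : ∀ (l : List Int) (k : Nat), l.Nodup → (pyCombos l k).Nodup := by
  intro l
  induction l with
  | nil => intro k h; cases k <;> simp [pyCombos]
  | cons x xs ih =>
    intro k h
    cases k with
    | zero => simp [pyCombos]
    | succ k =>
      have hx : x ∉ xs := (List.nodup_cons.mp h).1
      have hxs : xs.Nodup := (List.nodup_cons.mp h).2
      rw [pyCombos_cons]
      apply List.Nodup.append
      · exact List.Nodup.map (fun a b hab => by simpa using hab) (ih k hxs)
      · exact ih (k+1) hxs
      · intro b hb1 hb2
        simp only [List.mem_map] at hb1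
        rcases hb1 with ⟨c, _, rfl⟩
        have := combos_sublist xs (k+1) (x :: c) hb2
        exact hx (this.subset (by simp))

lemma sorted_sublist_pyRange : ∀ (d : Nat) (a b : Int) (l : List Int), (b - a).toNat ≤ d →
    List.Pairwise (· < ·) l → (∀ x ∈ l, a ≤ x ∧ x < b) → l.Sublist (PySem.List.pyRange a b 1) := by
  intro d
  induction d with
  | zero =>
    intro a b l hd hp hb
    cases l with
    | nil => simp
    | cons x l' => rcases hb x (by simp) with ⟨h1, h2⟩; omega
  | succ d ih =>
    intro a b l hd hp hb
    cases l with
    | nil => simp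
    | cons x l' =>
      have hab : a < b := by rcases hb x (by simp) with ⟨h1, h2⟩; omega
      rw [PySem.List.pyRange_one_cons hab]
      rcases eq_or_lt_of_le (hb x (by simp)).1 with heq | hlt
      · rw [heq]
        apply List.Sublist.cons₂
        apply ih (x+1) b l' (by omega) (List.Pairwise.sublist (List.sublist_cons_self x l') hp)
        intro y hy
        have := (List.pairwise_cons.mp hp).1 y hy
        exact ⟨by omega, (hb y (by simp [hy])).2⟩
      · apply List.Sublist.cons
        apply ih (a+1) b (x :: l') (by omega) hp
        intro y hy
        rcases List.mem_cons.mp hy with rfl | hy'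
        · exact ⟨by omega, (hb y (by simp)).2⟩
        · have := (List.pairwise_cons.mp hp).1 y hy'
          exact ⟨by omega, (hb y (by simp [hy'])).2⟩

lemma all_congr_mem {α : Type} (c : List α) (P Q : α → Bool) (h : ∀ f ∈ c, P f = Q f) :
    c.all P = c.all Q := by
  induction c with
  | nil => simp
  | cons y ys ih => simp [h y (by simp), ih (fun f hf => h f (by simp [hf]))]

lemma filter_combos : ∀ (t : List Int), t.Nodup → ∀ (k : Nat) (s : List Int), s.Sublist t →
    (pyCombos t k).filter (fun c => c.all (fun f => s.contains f)) = pyCombos s k := by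
  intro t
  induction t with
  | nil =>
    intro _ k s hs
    rw [List.sublist_nil] at hs; subst hs
    cases k <;> simp [pyCombos]
  | cons x t' ih =>
    intro hnd k s hs
    have hx : x ∉ t' := (List.nodup_cons.mp hnd).1
    have hnd' : t'.Nodup := (List.nodup_cons.mp hnd).2
    cases k with
    | zero => simp [pyCombos]
    | succ k =>
      by_cases hxs : x ∈ s
      · obtain ⟨s', rfl, hs'⟩ : ∃ s', s = x :: s' ∧ s'.Sublist t' := by
          cases hs with
          | cons _ h => exact absurd (h.subset hxs) hx
          | cons₂ _ h => exact ⟨_, rfl, h⟩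
        rw [pyCombos_cons x t' k, pyCombos_cons x s' k]
        simp only [List.filter_append, List.filter_map]
        congr 1
        · congr 1
          rw [List.filter_congr (q := fun c => c.all (fun f => s'.contains f))
              (fun c hc => ?_), ih hnd' k s' hs']
          have hcsub := combos_sublist t' k c hc
          simp only [Function.comp_apply, List.all_cons]
          have hx1 : (x :: s').contains x = true := by simp
          rw [hx1, Bool.true_and]
          apply all_congr_mem
          intro f hf
          have hft : f ∈ t' := hcsub.subset hf
          have hfx : f ≠ x := fun hfx => hx (hfx ▸ hft)
          simp [List.contains_iff_mem, hfx]
        · rw [List.filter_congr (q := fun c => c.all (fun f => s'.contains f))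
              (fun c hc => ?_), ih hnd' (k+1) s' hs']
          have hcsub := combos_sublist t' (k+1) c hc
          apply all_congr_mem
          intro f hf
          have hft : f ∈ t' := hcsub.subset hf
          have hfx : f ≠ x := fun hfx => hx (hfx ▸ hft)
          simp [List.contains_iff_mem, hfx]
      · have hst' : s.Sublist t' := by
          cases hs with
          | cons _ h => exact h
          | cons₂ _ h => exact absurd (by simp) hxs
        rw [pyCombos_cons x t' k]
        simp only [List.filter_append, List.filter_map]
        have h1 : List.filter ((fun c => c.all fun f => s.contains f) ∘ (fun c => x :: c)) (pyCombos t' k) = [] := by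
          apply List.filter_eq_nil_iff.mpr
          intro c _
          simp [List.contains_iff_mem, hxs]
        rw [h1, ih hnd' (k+1) s hst']
        simp

lemma flatMap_if_filter {α β : Type} (l : List α) (p : α → Bool) (g : α → List β) :
    l.flatMap (fun x => if p x then g x else []) = (l.filter p).flatMap g := by
  induction l with
  | nil => simp
  | cons x xs ih =>
    by_cases h : p x <;> simp [List.filter_cons, h, ih]

lemma index?_spec {α : Type} [BEq α] [LawfulBEq α] : ∀ (xs : List α) (x : α), x ∈ xs →
    ∃ j : Nat, PySem.List.index? xs x = some j ∧ xs[j]? = some x := by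
  intro xs x
  induction xs with
  | nil => simp
  | cons y ys ih =>
    intro hmem
    by_cases h : y = x
    · subst h
      exact ⟨0, by simp [PySem.List.index?, List.idxOf?_cons], by simp⟩
    · rcases List.mem_cons.mp hmem with rfl | hmem'
      · exact absurd rfl h
      · rcases ih hmem' with ⟨j, hj1, hj2⟩
        refine ⟨j + 1, ?_, by simpa using hj2⟩
        simp only [PySem.List.index?] at hj1 ⊢
        simp [List.idxOf?_cons, h, hj1]

lemma map_snd_enumerate (all : List (List Int)) :
    (PySem.List.enumerate all).map Prod.snd = all := by
  rw [PySem.List.enumerate_eq_zipIdx_map]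
  simp [List.map_map, Function.comp_def]

lemma buildIdx_getD (all : List (List Int)) (hnd : all.Nodup) (b : List Int) (hb : b ∈ all) :
    PySem.Dict.getD (buildIdx all) b 0 = (((PySem.List.index? all b).getD 0 : Nat) : Int) := by
  have hfresh : ∀ a ∈ PySem.List.enumerate all, (PySem.Dict.empty : PySem.Dict (List Int) Int).contains a.2 = false := by
    intro a _; simp [PySem.Dict.contains_empty]
  have hkeys : ((PySem.List.enumerate all).map Prod.snd).Nodup := by
    rw [map_snd_enumerate]; exact hnd
  have hitems : (buildIdx all).items
      = PySem.Dict.empty.items ++ (PySem.List.enumerate all).map (fun a => (a.2, a.1)) := by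
    exact PySem.Dict.items_foldl_insert_fresh (PySem.List.enumerate all) Prod.snd Prod.fst
      PySem.Dict.empty hfresh hkeys
  rcases index?_spec all b hb with ⟨j, hj1, hj2⟩
  have hz : (b, j) ∈ all.zipIdx := List.mk_mem_zipIdx_iff_getElem?.mpr hj2
  have hmemit : (b, (j : Int)) ∈ (buildIdx all).items := by
    rw [hitems]
    simp only [PySem.List.enumerate_eq_zipIdx_map, List.map_map, List.mem_append, List.mem_map]
    right
    exact ⟨(b, j), hz, by simp⟩
  have hknd : (buildIdx all).keys.Nodup := by
    have : (buildIdx all).keys = (buildIdx all).items.map (·.1) := rfl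
    rw [this, hitems]
    simp only [List.map_append, List.map_map]
    have h2 : ((PySem.List.enumerate all).map ((·.1) ∘ (fun a => (a.2, a.1)))) = all := by
      have : ((·.1) ∘ (fun (a : Int × List Int) => (a.2, a.1))) = Prod.snd := rfl
      rw [this, map_snd_enumerate]
    rw [h2]
    simpa using hnd
  rw [PySem.Dict.getD_of_mem_items (buildIdx all) hmemit hknd 0, hj1]
  simp

lemma recB_cons (k : Int) (idx : PySem.Dict (List Int) Int) (m : Int) (rest : List Int) :
    recB k idx (m :: rest) = (pyCombos rest (k.toNat - 1)).flatMap (fun comp =>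
        (recB k idx (rest.filter (fun f => !comp.contains f))).map
          (fun tail => PySem.Dict.getD idx (m :: comp) 0 :: tail)) := by
  rw [recB]

lemma fpA_base (n : Int) (all rem : List (List Int)) (used : PySem.Set Int) (path : List Int)
    (h : PySem.List.len used = n) : fpA n all rem used path = [path] := by
  cases rem with
  | nil => simp only [fpA, if_pos h]
  | cons c rest => simp only [fpA, if_pos h]

lemma fpA_skip (n : Int) (all : List (List Int)) : ∀ (pre rem : List (List Int)) (used : PySem.Set Int) (path : List Int),
    PySem.List.len used ≠ n → (∀ c ∈ pre, ∃ f ∈ c, f ∈ used) →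
    fpA n all (pre ++ rem) used path = fpA n all rem used path := by
  intro pre
  induction pre with
  | nil => simp
  | cons c pre' ih =>
    intro rem used path hlen hpre
    rcases hpre c (by simp) with ⟨f, hf, hfu⟩
    have hany : c.any (fun f => PySem.Set.contains used f) = true := by
      simp only [List.any_eq_true]
      exact ⟨f, hf, (PySem.Set.contains_iff used f).mpr hfu⟩
    simp only [List.cons_append, fpA, if_neg hlen, hany, if_pos rfl, List.nil_append]
    exact ih rem used path hlen (fun c' hc' => hpre c' (by simp [hc']))

lemma length_lt_of_compl (n m : Int) (used : List Int) (hnd : used.Nodup)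
    (hm : m ∈ PySem.List.pyRange 0 n 1) (hmem : ∀ x ∈ used, x ∈ PySem.List.pyRange 0 n 1)
    (hmu : m ∉ used) : used.length < (PySem.List.pyRange 0 n 1).length := by
  classical
  have h1 : used.toFinset ⊆ (PySem.List.pyRange 0 n 1).toFinset.erase m := by
    intro x hx
    rw [List.mem_toFinset] at hx
    rw [Finset.mem_erase, List.mem_toFinset]
    exact ⟨fun hxm => hmu (hxm ▸ hx), hmem x hx⟩
  have h2 : used.toFinset.card ≤ ((PySem.List.pyRange 0 n 1).toFinset.erase m).card :=
    Finset.card_le_card h1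
  rw [List.toFinset_card_of_nodup hnd] at h2
  have h3 : ((PySem.List.pyRange 0 n 1).toFinset.erase m).card
      < (PySem.List.pyRange 0 n 1).toFinset.card :=
    Finset.card_erase_lt_of_mem (List.mem_toFinset.mpr hm)
  rw [List.toFinset_card_of_nodup (PySem.List.nodup_pyRange_one 0 n)] at h3
  omega

lemma length_eq_of_compl_nil (n : Int) (used : List Int) (hnd : used.Nodup)
    (hmem : ∀ x, x ∈ used ↔ x ∈ PySem.List.pyRange 0 n 1) :
    used.length = (PySem.List.pyRange 0 n 1).length := by
  classical
  have h1 : used.toFinset = (PySem.List.pyRange 0 n 1).toFinset := by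
    ext x; simp [List.mem_toFinset, hmem]
  have := congrArg Finset.card h1
  rwa [List.toFinset_card_of_nodup hnd,
    List.toFinset_card_of_nodup (PySem.List.nodup_pyRange_one 0 n)] at this

lemma fpA_deadend (n m : Int) (all : List (List Int)) (hn : 0 ≤ n) (hm : m ∈ PySem.List.pyRange 0 n 1) :
    ∀ (rem : List (List Int)) (used : PySem.Set Int) (path : List Int), used.Nodup → m ∉ used →
    (∀ x ∈ used, x ∈ PySem.List.pyRange 0 n 1) →
    (∀ c ∈ rem, m ∉ c ∧ ∀ f ∈ c, f ∈ PySem.List.pyRange 0 n 1) →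
    fpA n all rem used path = [] := by
  intro rem
  induction rem with
  | nil =>
    intro used path hnd hmu hmem _
    have hlt := length_lt_of_compl n m used hnd hm hmem hmu
    have hlen : PySem.List.len used ≠ n := by
      rw [PySem.List.len_eq]
      rw [PySem.List.length_pyRange_one] at hlt
      omega
    simp only [fpA, if_neg hlen]
  | cons c rest ih =>
    intro used path hnd hmu hmem hrem
    have hlt := length_lt_of_compl n m used hnd hm hmem hmu
    have hlen : PySem.List.len used ≠ n := by
      rw [PySem.List.len_eq]
      rw [PySem.List.length_pyRange_one] at hlt
      omega
    simp only [fpA, if_neg hlen]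
    by_cases hany : c.any (fun f => PySem.Set.contains used f) = true
    · rw [if_pos hany, List.nil_append]
      exact ih used path hnd hmu hmem (fun c' hc' => hrem c' (by simp [hc']))
    · rw [if_neg hany]
      have hused' : (PySem.Set.union used (PySem.Set.ofList c)).Nodup :=
        PySem.Set.nodup_union used _ hnd
      have hmem' : ∀ x ∈ PySem.Set.union used (PySem.Set.ofList c), x ∈ PySem.List.pyRange 0 n 1 := by
        intro x hxu
        rcases (PySem.Set.mem_union used _ x).mp hxu with hx | hx
        · exact hmem x hx
        · exact (hrem c (by simp)).2 x ((PySem.Set.mem_ofList c x).mp hx)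
      have hmu' : m ∉ PySem.Set.union used (PySem.Set.ofList c) := by
        intro hmm
        rcases (PySem.Set.mem_union used _ m).mp hmm with hx | hx
        · exact hmu hx
        · exact (hrem c (by simp)).1 ((PySem.Set.mem_ofList c m).mp hx)
      rw [ih _ _ hused' hmu' hmem' (fun c' hc' => hrem c' (by simp [hc'])),
        ih used path hnd hmu hmem (fun c' hc' => hrem c' (by simp [hc']))]
      simp

lemma peel (n : Int) (K : Nat) (hK : 1 ≤ K) : ∀ (d : Nat) (a m' : Int), m' = a + d → m' ≤ n →
    ∃ pre, pyCombos (PySem.List.pyRange a n 1) K = pre ++ pyCombos (PySem.List.pyRange m' n 1) K ∧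
      ∀ c ∈ pre, ∃ f ∈ c, a ≤ f ∧ f < m' := by
  intro d
  induction d with
  | zero =>
    intro a m' h1 _
    exact ⟨[], by simp [h1], by simp⟩
  | succ d ih =>
    intro a m' h1 h2
    have ha : a < n := by omega
    rcases ih (a+1) m' (by omega) h2 with ⟨pre', hpre'1, hpre'2⟩
    obtain ⟨K', rfl⟩ : ∃ K', K = K' + 1 := ⟨K - 1, by omega⟩
    refine ⟨(pyCombos (PySem.List.pyRange (a+1) n 1) K').map (fun c => a :: c) ++ pre', ?_, ?_⟩
    · rw [PySem.List.pyRange_one_cons ha, pyCombos_cons]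
      simp only [List.append_assoc, hpre'1]
    · intro c hc
      rcases List.mem_append.mp hc with hc1 | hc2
      · rcases List.mem_map.mp hc1 with ⟨c', _, rfl⟩
        exact ⟨a, by simp, le_refl a, by omega⟩
      · rcases hpre'2 c hc2 with ⟨f, hf1, hf2, hf3⟩
        exact ⟨f, hf1, by omega, hf3⟩

lemma main (n k : Int) (hn : 0 < n) (hk : 1 ≤ k) :
    ∀ (N : Nat) (u : List Int) (used : PySem.Set Int) (path : List Int), u.length ≤ N →
    u.Sublist (PySem.List.pyRange 0 n 1) → used.Nodup →
    (∀ x : Int, x ∈ used ↔ x ∈ PySem.List.pyRange 0 n 1 ∧ x ∉ u) →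
    fpA n (pyCombos (PySem.List.pyRange 0 n 1) k.toNat)
        (pyCombos (PySem.List.pyRange (u.headD n) n 1) k.toNat) used path
      = (recB k (buildIdx (pyCombos (PySem.List.pyRange 0 n 1) k.toNat)) u).map (fun t => path ++ t) := by
  intro N
  induction N with
  | zero =>
    intro u used path hN hsub hnd hchar
    have hu : u = [] := List.length_eq_zero_iff.mp (Nat.le_zero.mp hN)
    subst hu
    have hchar' : ∀ x, x ∈ used ↔ x ∈ PySem.List.pyRange 0 n 1 := by
      intro x; simpa using hchar x
    have hlen : PySem.List.len used = n := by
      rw [PySem.List.len_eq, length_eq_of_compl_nil n used hnd hchar', PySem.List.length_pyRange_one]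
      omega
    rw [fpA_base _ _ _ _ _ hlen]
    simp [recB]
  | succ N ihN =>
    intro u used path hN hsub hnd hchar
    cases u with
    | nil =>
      have hchar' : ∀ x, x ∈ used ↔ x ∈ PySem.List.pyRange 0 n 1 := by
        intro x; simpa using hchar x
      have hlen : PySem.List.len used = n := by
        rw [PySem.List.len_eq, length_eq_of_compl_nil n used hnd hchar', PySem.List.length_pyRange_one]
        omega
      rw [fpA_base _ _ _ _ _ hlen]
      simp [recB]
    | cons m urest =>
      have hmemu : ∀ x ∈ m :: urest, x ∈ PySem.List.pyRange 0 n 1 := fun x hx => hsub.subset hx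
      have hm : m ∈ PySem.List.pyRange 0 n 1 := hmemu m (by simp)
      have hmb : 0 ≤ m ∧ m < n := (PySem.List.mem_pyRange_one).mp hm
      have hpu : List.Pairwise (· < ·) (m :: urest) :=
        List.Pairwise.sublist hsub (PySem.List.pairwise_lt_pyRange_one 0 n)
      have hmlt : ∀ x ∈ urest, m < x := (List.pairwise_cons.mp hpu).1
      have hmnu : m ∉ urest := fun h => absurd (hmlt m h) (lt_irrefl m)
      have hmused : m ∉ used := fun h => ((hchar m).mp h).2 (by simp)
      have husedmem : ∀ x ∈ used, x ∈ PySem.List.pyRange 0 n 1 := fun x hx => ((hchar x).mp hx).1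
      have hlenne : PySem.List.len used ≠ n := by
        have := length_lt_of_compl n m used hnd hm husedmem hmused
        rw [PySem.List.length_pyRange_one] at this
        rw [PySem.List.len_eq]; omega
      have hurest_sub : urest.Sublist (PySem.List.pyRange (m+1) n 1) := by
        apply sorted_sublist_pyRange (n - (m+1)).toNat (m+1) n urest le_rfl (List.pairwise_cons.mp hpu).2
        intro x hx
        have h1 := hmlt x hx
        have h2 := (PySem.List.mem_pyRange_one).mp (hmemu x (by simp [hx]))
        exact ⟨by omega, by omega⟩
      have hurestR : urest.Sublist (PySem.List.pyRange 0 n 1) := (List.sublist_cons_self m urest).trans hsub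
      obtain ⟨K', hK'⟩ : ∃ K', k.toNat = K' + 1 := ⟨k.toNat - 1, by omega⟩
      have hhead : (m :: urest).headD n = m := rfl
      rw [hhead, PySem.List.pyRange_one_cons hmb.2, hK']
      set ALL := pyCombos (PySem.List.pyRange 0 n 1) (K' + 1) with hALL
      set IDX := buildIdx ALL with hIDX
      have hRnd : (PySem.List.pyRange (m+1) n 1).Nodup := PySem.List.nodup_pyRange_one _ _
      have hALLnd : ALL.Nodup := combos_nodup _ _ (PySem.List.nodup_pyRange_one 0 n)
      have mrun : ∀ cs : List (List Int), (∀ c ∈ cs, c ∈ pyCombos (PySem.List.pyRange (m+1) n 1) K') →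
          fpA n ALL (cs.map (fun c => m :: c) ++ pyCombos (PySem.List.pyRange (m+1) n 1) (K'+1)) used path
          = cs.flatMap (fun comp => if comp.all (fun f => urest.contains f)
              then (recB k IDX (urest.filter (fun f => !comp.contains f))).map
                     (fun t => (path ++ [PySem.Dict.getD IDX (m :: comp) 0]) ++ t)
              else []) := by
        intro cs
        induction cs with
        | nil =>
          intro _
          simp only [List.map_nil, List.nil_append, List.flatMap_nil]
          apply fpA_deadend n m ALL (le_of_lt hn) hm _ used path hnd hmused husedmem
          intro c hc
          have hcsub := combos_sublist _ _ c hc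
          constructor
          · intro hmc
            have := (PySem.List.mem_pyRange_one).mp (hcsub.subset hmc)
            omega
          · intro f hf
            have := (PySem.List.mem_pyRange_one).mp (hcsub.subset hf)
            rw [PySem.List.mem_pyRange_one]
            omega
        | cons comp cs' ihcs =>
          intro hcs
          have hcomp := hcs comp (by simp)
          have hcompsub : comp.Sublist (PySem.List.pyRange (m+1) n 1) := combos_sublist _ _ comp hcomp
          have hcomplen : comp.length = K' := combos_length _ _ comp hcomp
          have hcompmem : ∀ f ∈ comp, m + 1 ≤ f ∧ f < n := by
            intro f hf; exact (PySem.List.mem_pyRange_one).mp (hcompsub.subset hf)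
          simp only [List.map_cons, List.cons_append, List.flatMap_cons]
          simp only [fpA]
          rw [if_neg hlenne]
          by_cases hss : comp.all (fun f => urest.contains f) = true
          · have hanyF : ((m :: comp).any (fun f => PySem.Set.contains used f)) = false := by
              apply List.any_eq_false.mpr
              intro f hf
              rcases List.mem_cons.mp hf with rfl | hfc
              · exact fun h => hmused ((PySem.Set.contains_iff used _).mp h)
              · have hfur : f ∈ urest := List.contains_iff_mem.mp (List.all_eq_true.mp hss f hfc)
                exact fun h => ((hchar f).mp ((PySem.Set.contains_iff used f).mp h)).2 (by simp [hfur])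
            rw [hanyF]
            simp only [Bool.false_eq_true, if_false]
            set u' := urest.filter (fun f => !comp.contains f) with hu'
            set used' := PySem.Set.union used (PySem.Set.ofList (m :: comp)) with hused'
            set ipath := (((PySem.List.index? ALL (m :: comp)).getD 0 : Nat) : Int) with hipath
            have hmcALL : (m :: comp) ∈ ALL := by
              apply mem_combos
              · have h1 : (m :: comp).Sublist (PySem.List.pyRange m n 1) := by
                  rw [PySem.List.pyRange_one_cons hmb.2]
                  exact List.Sublist.cons₂ m hcompsub
                have h2 : PySem.List.pyRange 0 n 1 = PySem.List.pyRange 0 m 1 ++ PySem.List.pyRange m n 1 :=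
                  PySem.List.pyRange_one_append 0 m n hmb.1 (le_of_lt hmb.2)
                rw [h2]
                exact h1.trans (List.sublist_append_right _ _)
              · simp [hcomplen]
            have hidx : PySem.Dict.getD IDX (m :: comp) 0 = ipath :=
              buildIdx_getD ALL hALLnd (m :: comp) hmcALL
            have hnd' : used'.Nodup := PySem.Set.nodup_union used _ hnd
            have hcharu' : ∀ x : Int, x ∈ used' ↔ x ∈ PySem.List.pyRange 0 n 1 ∧ x ∉ u' := by
              intro x
              constructor
              · intro hx
                rcases (PySem.Set.mem_union used _ x).mp hx with hx | hx
                · have hx2 := (hchar x).mp hx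
                  refine ⟨hx2.1, fun hxu' => hx2.2 ?_⟩
                  have : x ∈ urest := (List.mem_filter.mp hxu').1
                  simp [this]
                · have hx' := (PySem.Set.mem_ofList _ x).mp hx
                  rcases List.mem_cons.mp hx' with rfl | hxc
                  · exact ⟨hm, fun hxu' => hmnu (List.mem_filter.mp hxu').1⟩
                  · refine ⟨?_, ?_⟩
                    · rw [PySem.List.mem_pyRange_one]
                      have := hcompmem x hxc; omega
                    · intro hxu'
                      have h3 := (List.mem_filter.mp hxu').2
                      simp [List.contains_iff_mem, hxc] at h3
              · rintro ⟨hxR, hxu'⟩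
                apply (PySem.Set.mem_union used _ x).mpr
                by_cases hxc : x ∈ comp
                · exact Or.inr ((PySem.Set.mem_ofList _ x).mpr (by simp [hxc]))
                · by_cases hxm : x = m
                  · exact Or.inr ((PySem.Set.mem_ofList _ x).mpr (by simp [hxm]))
                  · left
                    apply (hchar x).mpr
                    refine ⟨hxR, fun hxu => ?_⟩
                    rcases List.mem_cons.mp hxu with rfl | hxur
                    · exact hxm rfl
                    · apply hxu'
                      rw [hu', List.mem_filter]
                      exact ⟨hxur, by simp [List.contains_iff_mem, hxc]⟩
            have hu'subR : u'.Sublist (PySem.List.pyRange 0 n 1) :=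
              List.Sublist.trans (by rw [hu']; exact List.filter_sublist) hurestR
            have hu'len : u'.length ≤ N := by
              have h1 : u'.length ≤ urest.length := List.length_filter_le _ _
              have h2 : urest.length + 1 ≤ N + 1 := by simpa using hN
              omega
            have hmu' : m ∈ used' :=
              (PySem.Set.mem_union used _ m).mpr (Or.inr ((PySem.Set.mem_ofList _ m).mpr (by simp)))
            have hfirst : fpA n ALL (cs'.map (fun c => m :: c) ++ pyCombos (PySem.List.pyRange (m+1) n 1) (K'+1)) used' (path ++ [ipath])
                = (recB k IDX u').map (fun t => (path ++ [ipath]) ++ t) := by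
              cases hu'c : u' with
              | nil =>
                have hch : ∀ x : Int, x ∈ used' ↔ x ∈ PySem.List.pyRange 0 n 1 := by
                  intro x
                  rw [hcharu' x, hu'c]
                  simp
                have hlen' : PySem.List.len used' = n := by
                  rw [PySem.List.len_eq, length_eq_of_compl_nil n used' hnd' hch, PySem.List.length_pyRange_one]
                  omega
                rw [fpA_base _ _ _ _ _ hlen']
                simp [recB]
              | cons m' u'' =>
                have hm'u' : m' ∈ u' := by rw [hu'c]; simp
                have hm'urest : m' ∈ urest := (List.mem_filter.mp hm'u').1
                have hm'R : m' ∈ PySem.List.pyRange 0 n 1 := hurestR.subset hm'urest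
                have hmm' : m < m' := hmlt m' hm'urest
                have hm'b := (PySem.List.mem_pyRange_one).mp hm'R
                have hm'used' : m' ∉ used' := fun h => ((hcharu' m').mp h).2 hm'u'
                have husedmem' : ∀ x ∈ used', x ∈ PySem.List.pyRange 0 n 1 := fun x hx => ((hcharu' x).mp hx).1
                have hlenne' : PySem.List.len used' ≠ n := by
                  have := length_lt_of_compl n m' used' hnd' hm'R husedmem' hm'used'
                  rw [PySem.List.length_pyRange_one] at this
                  rw [PySem.List.len_eq]; omega
                have hpu' : List.Pairwise (· < ·) u' :=
                  List.Pairwise.filter _ (List.pairwise_cons.mp hpu).2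
                rw [fpA_skip n ALL _ _ used' _ hlenne'
                  (by
                    intro c hc
                    rcases List.mem_map.mp hc with ⟨c0, _, rfl⟩
                    exact ⟨m, by simp, hmu'⟩)]
                obtain ⟨pre, hpre1, hpre2⟩ :=
                  peel n (K'+1) (by omega) (m' - (m+1)).toNat (m+1) m' (by omega) (by omega)
                rw [hpre1, fpA_skip n ALL pre _ used' _ hlenne'
                  (by
                    intro c hc
                    rcases hpre2 c hc with ⟨f, hf, hf1, hf2⟩
                    refine ⟨f, hf, ?_⟩
                    apply (hcharu' f).mpr
                    refine ⟨by rw [PySem.List.mem_pyRange_one]; omega, fun hfu' => ?_⟩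
                    rw [hu'c] at hfu'
                    rcases List.mem_cons.mp hfu' with rfl | hfu''
                    · omega
                    · have hgt : m' < f := (List.pairwise_cons.mp (hu'c ▸ hpu')).1 f hfu''
                      omega)]
                have hih := ihN u' used' (path ++ [ipath]) hu'len hu'subR hnd' hcharu'
                rw [hK', ← hALL, ← hIDX] at hih
                rw [hu'c] at hih
                simp only [List.headD_cons] at hih
                exact hih
            rw [hfirst, ihcs (fun c hc => hcs c (by simp [hc]))]
            rw [if_pos hss, hidx]
          · have hanyT : ((m :: comp).any (fun f => PySem.Set.contains used f)) = true := by
              obtain ⟨f, hfc, hfn⟩ : ∃ f ∈ comp, ¬ (urest.contains f = true) := by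
                by_contra hcon
                exact hss (List.all_eq_true.mpr (fun f hf => by
                  by_contra h2; exact hcon ⟨f, hf, h2⟩))
              have hfur : f ∉ urest := fun h => hfn (List.contains_iff_mem.mpr h)
              have hfb := hcompmem f hfc
              have hfused : f ∈ used := by
                apply (hchar f).mpr
                refine ⟨by rw [PySem.List.mem_pyRange_one]; omega, fun hfu => ?_⟩
                rcases List.mem_cons.mp hfu with rfl | hfu'
                · omega
                · exact hfur hfu'
              apply List.any_eq_true.mpr
              exact ⟨f, by simp [hfc], (PySem.Set.contains_iff used f).mpr hfused⟩
            rw [hanyT]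
            simp only [if_true, List.nil_append]
            rw [if_neg hss, ihcs (fun c hc => hcs c (by simp [hc]))]
            simp
      rw [pyCombos_cons m (PySem.List.pyRange (m+1) n 1) K']
      rw [mrun (pyCombos (PySem.List.pyRange (m+1) n 1) K') (fun c hc => hc)]
      rw [flatMap_if_filter, filter_combos _ hRnd K' urest hurest_sub]
      rw [recB_cons, hK']
      simp only [Nat.add_sub_cancel, List.map_flatMap, List.map_map]
      refine congrArg (fun F => List.flatMap F (pyCombos urest K')) (funext fun comp => ?_)
      exact congrArg (fun F => List.map F _) (funext fun t => by simp [Function.comp_def])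

-- ===== VERDICT (by name: the statement is the Claim_ definition above) =====
theorem generate_cpcv_paths_spec : Claim_equal_generate_cpcv_paths := by
  intro n k _ hpre
  obtain ⟨hn, hk⟩ := hpre
  unfold Spec_generate_cpcv_paths generate_cpcv_paths generate_cpcv_paths_alt
  by_cases hn0 : n = 0
  · subst hn0
    rw [if_pos rfl]
    exact fpA_base 0 _ _ _ _ (by rfl)
  · by_cases hk0 : k < 1
    · have hkz : k = 0 := by omega
      subst hkz
      rw [if_neg hn0, if_pos hk0]
      have h0n : ¬ ((0:Int) = n) := fun h => hn0 h.symm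
      rw [show pyCombos (PySem.List.pyRange 0 n 1) (Int.toNat 0) = [[]] from pyCombos_zero _]
      have hu0 : PySem.Set.union PySem.Set.empty (PySem.Set.ofList ([] : List Int)) = PySem.Set.empty := rfl
      show fpA n [[]] [[]] PySem.Set.empty [] = []
      simp [fpA, hu0, PySem.List.len_eq, PySem.Set.empty, h0n]
    · rw [if_neg hn0, if_neg hk0]
      have hmain := main n k (by omega) (by omega) (PySem.List.pyRange 0 n 1).length
        (PySem.List.pyRange 0 n 1) PySem.Set.empty [] le_rfl (List.Sublist.refl _)
        List.nodup_nil (by intro x; simp [PySem.Set.empty])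
      have hhd : (PySem.List.pyRange 0 n 1).headD n = 0 := by
        rw [PySem.List.pyRange_one_cons (show (0:Int) < n by omega)]
        rfl
      rw [hhd] at hmain
      simpa using hmain
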